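-- pv_equiv track=rewrite | github.com/the-web3/ai-web3-shenzhen | TheWeb3_AGENT/web3_rag/src/rag_engine.py | _split_section_blocks
-- ===== SOURCE A (Python) =====
-- def _split_section_blocks(text: str) -> list[dict[str, str]]:
--     blocks: list[dict[str, str]] = []
--     paragraph_lines: list[str] = []
--     code_lines: list[str] = []
--     in_code_block = False
--
--     def flush_paragraph() -> None:
--         if paragraph_lines:
--             blocks.append({"type": "text", "text": "\n".join(paragraph_lines).strip()})
--             paragraph_lines.clear()
--
--     for line in text.splitlines():
--         stripped = line.strip()
--         if stripped.startswith("```"):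
--             if in_code_block:
--                 code_lines.append(line)
--                 blocks.append({"type": "code", "text": "\n".join(code_lines).strip()})
--                 code_lines = []
--                 in_code_block = False
--             else:
--                 flush_paragraph()
--                 in_code_block = True
--                 code_lines = [line]
--             continue
--
--         if in_code_block:
--             code_lines.append(line)
--             continue
--
--         if not stripped:
--             flush_paragraph()
--             continue
--
--         paragraph_lines.append(line)
--
--     if in_code_block and code_lines:
--         blocks.append({"type": "code", "text": "\n".join(code_lines).strip()})
--     elif paragraph_lines:
--         flush_paragraph()
--
--     return [block for block in blocks if block["text"]]
-- ===== SOURCE B (Python) =====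
-- def _is_fence(line: str) -> bool:
--     return line.strip().startswith("```")
--
--
-- def _take_until_fence(lines: list[str]) -> tuple[list[str], list[str]]:
--     for i, line in enumerate(lines):
--         if _is_fence(line):
--             return lines[:i], lines[i:]
--     return lines, []
--
--
-- def _emit(ty: str, seg: list[str]) -> list[dict[str, str]]:
--     t = "\n".join(seg).strip()
--     return [{"type": ty, "text": t}] if t else []
--
--
-- def _paragraph_blocks(seg: list[str]) -> list[dict[str, str]]:
--     out: list[dict[str, str]] = []
--     i, n = 0, len(seg)
--     while i < n:
--         if not seg[i].strip():
--             i += 1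
--             continue
--         j = i
--         while j < n and seg[j].strip():
--             j += 1
--         out.extend(_emit("text", seg[i:j]))
--         i = j
--     return out
--
--
-- def _split_section_blocks(text: str) -> list[dict[str, str]]:
--     blocks: list[dict[str, str]] = []
--     lines = text.splitlines()
--     while lines:
--         if _is_fence(lines[0]):
--             body, rest = _take_until_fence(lines[1:])
--             blocks.extend(_emit("code", [lines[0]] + body + rest[:1]))
--             lines = rest[1:]
--         else:
--             seg, lines = _take_until_fence(lines)
--             blocks.extend(_paragraph_blocks(seg))
--     return blocks
-- ===== Notes on version B (the rewrite author's own statement) =====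
-- stated objective: alternative
-- what changed: Replaces A's single-pass state-machine loop (in_code_block flag + two mutable accumulators + final flush and filter) with a segment decomposition: the line list is repeatedly split at fence lines into code segments (opening fence through closing fence, or to end of input) and non-code segments, which are then grouped into blank-separated paragraph runs; blocks are emitted already filtered.
import Mathlib
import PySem

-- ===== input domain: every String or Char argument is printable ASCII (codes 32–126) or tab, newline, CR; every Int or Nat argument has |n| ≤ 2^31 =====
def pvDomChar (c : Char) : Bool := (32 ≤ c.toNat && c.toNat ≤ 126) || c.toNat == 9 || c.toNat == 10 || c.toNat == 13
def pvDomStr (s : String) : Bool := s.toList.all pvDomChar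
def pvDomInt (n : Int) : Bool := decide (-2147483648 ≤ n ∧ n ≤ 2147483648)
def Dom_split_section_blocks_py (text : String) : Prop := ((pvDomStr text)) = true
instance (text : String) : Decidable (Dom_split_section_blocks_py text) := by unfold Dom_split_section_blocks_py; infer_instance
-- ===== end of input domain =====

-- B restructures A's one-pass flag loop as a fence-segment decomposition followed by paragraph grouping (alternative decomposition, same cost).

-- ===== PORT A =====
def pvFlushA (blocks : List (List (String × String))) (para : List String) :
    List (List (String × String)) :=
  if para.isEmpty then blocks
  else blocks ++ [[("type", "text"), ("text", PySem.Str.strip (PySem.Str.join "\n" para))]]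

def pvPredA (b : List (String × String)) : Bool :=
  !((PySem.Dict.mk b).getD "text" "" == "")

def pvStepA (st : List (List (String × String)) × List String × List String × Bool)
    (line : String) : List (List (String × String)) × List String × List String × Bool :=
  let (blocks, para, code, inCode) := st
  let stripped := PySem.Str.strip line
  if PySem.Str.startswith stripped "```" then
    if inCode then
      (blocks ++ [[("type", "code"),
        ("text", PySem.Str.strip (PySem.Str.join "\n" (code ++ [line])))]], para, [], false)
    else
      (pvFlushA blocks para, [], [line], true)
  else if inCode then
    (blocks, para, code ++ [line], inCode)
  else if stripped == "" then
    (pvFlushA blocks para, [], code, inCode)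
  else
    (blocks, para ++ [line], code, inCode)

def pvAfin (st : List (List (String × String)) × List String × List String × Bool) :
    List (List (String × String)) :=
  (if st.2.2.2 && !st.2.2.1.isEmpty then
      st.1 ++ [[("type", "code"), ("text", PySem.Str.strip (PySem.Str.join "\n" st.2.2.1))]]
    else if !st.2.1.isEmpty then pvFlushA st.1 st.2.1
    else st.1).filter pvPredA

def split_section_blocks_py (text : String) : List (List (String × String)) :=
  pvAfin ((PySem.Str.splitlines text).foldl pvStepA ([], [], [], false))

-- ===== PORT B =====
def pvIsFence (line : String) : Bool :=
  PySem.Str.startswith (PySem.Str.strip line) "```"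

def pvTakeUntilFence : List String → List String × List String
  | [] => ([], [])
  | l :: ls =>
    if pvIsFence l then ([], l :: ls)
    else
      let pr := pvTakeUntilFence ls
      (l :: pr.1, pr.2)

-- needed by the ports' termination proofs
theorem pvTakeUntilFence_snd_length (ls : List String) :
    (pvTakeUntilFence ls).2.length ≤ ls.length := by
  induction ls with
  | nil => simp [pvTakeUntilFence]
  | cons l ls ih =>
    simp only [pvTakeUntilFence]
    split
    · simp
    · simpa using Nat.le_succ_of_le ih

def pvEmit (ty : String) (seg : List String) : List (List (String × String)) :=
  let t := PySem.Str.strip (PySem.Str.join "\n" seg)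
  if t == "" then [] else [[("type", ty), ("text", t)]]

def pvParagraphBlocks : List String → List (List (String × String))
  | [] => []
  | l :: ls =>
    if PySem.Str.strip l == "" then pvParagraphBlocks ls
    else
      pvEmit "text" (l :: ls.takeWhile (fun x => !(PySem.Str.strip x == ""))) ++
        pvParagraphBlocks (ls.dropWhile (fun x => !(PySem.Str.strip x == "")))
termination_by ls => ls.length
decreasing_by
  · simp
  · simpa using Nat.lt_succ_of_le (ls.length_dropWhile_le _)

def pvSplitBlocksB : List String → List (List (String × String))
  | [] => []
  | l :: ls =>
    if _h : pvIsFence l then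
      let pr := pvTakeUntilFence ls
      pvEmit "code" (l :: (pr.1 ++ pr.2.take 1)) ++ pvSplitBlocksB (pr.2.drop 1)
    else
      let pr := pvTakeUntilFence (l :: ls)
      pvParagraphBlocks pr.1 ++ pvSplitBlocksB pr.2
termination_by ls => ls.length
decreasing_by
  · have := pvTakeUntilFence_snd_length ls
    simp only [List.length_drop, List.length_cons]
    omega
  · have := pvTakeUntilFence_snd_length ls
    simp only [pvTakeUntilFence, _h, if_neg, Bool.false_eq_true, not_false_iff, List.length_cons]
    omega

def split_section_blocks_py_alt (text : String) : List (List (String × String)) :=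
  pvSplitBlocksB (PySem.Str.splitlines text)

-- ===== PRECONDITION & SPEC =====
def Spec_split_section_blocks_py (text : String) (out : List (List (String × String))) : Prop := out = split_section_blocks_py_alt text
instance (text : String) (out : List (List (String × String))) : Decidable (Spec_split_section_blocks_py text out) := by unfold Spec_split_section_blocks_py; infer_instance

-- ===== CLAIM (what is proved, stated in full; the proofs are below) =====
def Claim_equal_split_section_blocks_py : Prop := ∀ (text : String), Dom_split_section_blocks_py text → Spec_split_section_blocks_py text (split_section_blocks_py text)

-- ===== LEMMAS AND PROOFS =====

-- A's state machine, restated with emission already filtered (proof-side bridge)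
def pvBaux : List String → List String → List (List (String × String))
  | para, [] => pvEmit "text" para
  | para, l :: ls =>
    if _h : pvIsFence l then
      let pr := pvTakeUntilFence ls
      pvEmit "text" para ++ pvEmit "code" (l :: (pr.1 ++ pr.2.take 1)) ++ pvBaux [] (pr.2.drop 1)
    else if PySem.Str.strip l == "" then pvEmit "text" para ++ pvBaux [] ls
    else pvBaux (para ++ [l]) ls
termination_by _ ls => ls.length
decreasing_by
  · have := pvTakeUntilFence_snd_length ls
    simp only [List.length_drop, List.length_cons]
    omega
  · simp
  · simp

theorem pvEmit_nil (ty : String) : pvEmit ty [] = [] := by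
  have h : (PySem.Str.strip (PySem.Str.join "\n" ([] : List String)) == "") = true := by decide
  simp [pvEmit, h]

theorem pvPredA_block (ty t : String) : pvPredA [("type", ty), ("text", t)] = !(t == "") := by
  simp [pvPredA, PySem.Dict.getD_eq_get?_getD, PySem.Dict.get?_mk_cons]

theorem pvFilter_emit (ty : String) (seg : List String) :
    List.filter pvPredA
      [[("type", ty), ("text", PySem.Str.strip (PySem.Str.join "\n" seg))]] = pvEmit ty seg := by
  simp only [pvEmit, List.filter, pvPredA_block]
  cases PySem.Str.strip (PySem.Str.join "\n" seg) == "" <;> simp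

theorem pvFilter_flushA (blocks : List (List (String × String))) (para : List String) :
    List.filter pvPredA (pvFlushA blocks para) =
      List.filter pvPredA blocks ++ pvEmit "text" para := by
  cases hp : para.isEmpty
  · simp [pvFlushA, hp, List.filter_append, pvFilter_emit]
  · have : para = [] := List.isEmpty_iff.mp hp
    subst this
    simp [pvFlushA, pvEmit_nil]

theorem pvTakeUntilFence_eq (ls : List String) :
    pvTakeUntilFence ls =
      (ls.takeWhile (fun l => !pvIsFence l), ls.dropWhile (fun l => !pvIsFence l)) := by
  induction ls with
  | nil => simp [pvTakeUntilFence]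
  | cons l ls ih =>
    cases h : pvIsFence l <;>
      simp [pvTakeUntilFence, h, ih]

-- pvStepA reduction lemmas
theorem pvStepA_close (blocks : List (List (String × String))) (para code : List String)
    (line : String) (h : pvIsFence line = true) :
    pvStepA (blocks, para, code, true) line =
      (blocks ++ [[("type", "code"),
        ("text", PySem.Str.strip (PySem.Str.join "\n" (code ++ [line])))]], para, [], false) := by
  simp only [pvIsFence] at h
  simp only [pvStepA, h]
  simp

theorem pvStepA_open (blocks : List (List (String × String))) (para code : List String)
    (line : String) (h : pvIsFence line = true) :
    pvStepA (blocks, para, code, false) line = (pvFlushA blocks para, [], [line], true) := by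
  simp only [pvIsFence] at h
  simp only [pvStepA, h]
  simp

theorem pvStepA_code (blocks : List (List (String × String))) (para code : List String)
    (line : String) (h : pvIsFence line = false) :
    pvStepA (blocks, para, code, true) line = (blocks, para, code ++ [line], true) := by
  simp only [pvIsFence] at h
  simp only [pvStepA, h]
  simp

theorem pvStepA_blank (blocks : List (List (String × String))) (para code : List String)
    (line : String) (h : pvIsFence line = false) (hb : (PySem.Str.strip line == "") = true) :
    pvStepA (blocks, para, code, false) line = (pvFlushA blocks para, [], code, false) := by
  simp only [pvIsFence] at h
  simp only [pvStepA, h, hb]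
  simp

theorem pvStepA_text (blocks : List (List (String × String))) (para code : List String)
    (line : String) (h : pvIsFence line = false) (hb : (PySem.Str.strip line == "") = false) :
    pvStepA (blocks, para, code, false) line = (blocks, para ++ [line], code, false) := by
  simp only [pvIsFence] at h
  simp only [pvStepA, h, hb]
  simp

theorem pvAfin_code (blocks : List (List (String × String))) (para code : List String)
    (hc : code ≠ []) :
    pvAfin (blocks, para, code, true) =
      List.filter pvPredA blocks ++ pvEmit "code" code := by
  have h : code.isEmpty = false := by simpa [List.isEmpty_iff] using hc
  simp [pvAfin, h, List.filter_append, pvFilter_emit]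

theorem pvAfin_text (blocks : List (List (String × String))) (para : List String) :
    pvAfin (blocks, para, [], false) =
      List.filter pvPredA blocks ++ pvEmit "text" para := by
  cases hp : para.isEmpty
  · simp [pvAfin, hp, pvFilter_flushA]
  · have : para = [] := List.isEmpty_iff.mp hp
    subst this
    simp [pvAfin, pvEmit_nil]

theorem pvCodeRun (lines : List String) : ∀ blocks para code, code ≠ [] →
    pvAfin (List.foldl pvStepA (blocks, para, code, true) lines) =
      (match pvTakeUntilFence lines with
       | (body, []) => List.filter pvPredA blocks ++ pvEmit "code" (code ++ body)
       | (body, f :: r) =>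
         pvAfin (List.foldl pvStepA
           (blocks ++ [[("type", "code"),
              ("text", PySem.Str.strip (PySem.Str.join "\n" (code ++ body ++ [f])))]],
            para, [], false) r)) := by
  induction lines with
  | nil =>
    intro blocks para code hc
    simpa [pvTakeUntilFence] using pvAfin_code blocks para code hc
  | cons l ls ih =>
    intro blocks para code hc
    cases hf : pvIsFence l
    · rw [List.foldl_cons, pvStepA_code blocks para code l hf,
        ih blocks para (code ++ [l]) (by simp)]
      rcases h2 : pvTakeUntilFence ls with ⟨body, rest⟩
      cases rest <;> simp [pvTakeUntilFence, hf, h2]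
    · rw [List.foldl_cons, pvStepA_close blocks para code l hf]
      simp [pvTakeUntilFence, hf]

theorem pvMainA : ∀ (n : Nat) (lines : List String), lines.length ≤ n →
    ∀ blocks para,
      pvAfin (List.foldl pvStepA (blocks, para, [], false) lines) =
        List.filter pvPredA blocks ++ pvBaux para lines := by
  intro n
  induction n with
  | zero =>
    intro lines hlen blocks para
    have : lines = [] := by cases lines <;> simp_all
    subst this
    simpa [pvBaux] using pvAfin_text blocks para
  | succ n ih =>
    intro lines hlen blocks para
    cases lines with
    | nil => simpa [pvBaux] using pvAfin_text blocks para
    | cons l ls =>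
      have hls : ls.length ≤ n := by simpa using hlen
      cases hf : pvIsFence l
      · cases hb : PySem.Str.strip l == ""
        · rw [List.foldl_cons, pvStepA_text blocks para [] l hf hb, ih ls hls]
          simp [pvBaux, hf, hb]
        · rw [List.foldl_cons, pvStepA_blank blocks para [] l hf hb, ih ls hls,
            pvFilter_flushA]
          simp [pvBaux, hf, hb]
      · rw [List.foldl_cons, pvStepA_open blocks para [] l hf,
          pvCodeRun ls (pvFlushA blocks para) [] [l] (by simp)]
        rcases h2 : pvTakeUntilFence ls with ⟨body, rest⟩
        cases rest with
        | nil => simp [pvBaux, hf, h2, pvFilter_flushA, pvEmit_nil]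
        | cons f r =>
          have hr : r.length ≤ n := by
            have := pvTakeUntilFence_snd_length ls
            rw [h2] at this
            simp only [List.length_cons] at this
            omega
          simp only []
          rw [ih r hr, List.filter_append, pvFilter_flushA, pvFilter_emit]
          simp [pvBaux, hf, h2]

theorem pvBaux_push (lines : List String) : ∀ para, para ≠ [] →
    pvBaux para lines =
      pvEmit "text" (para ++ lines.takeWhile (fun x => !pvIsFence x && !(PySem.Str.strip x == ""))) ++
        pvBaux [] (lines.dropWhile (fun x => !pvIsFence x && !(PySem.Str.strip x == ""))) := by
  induction lines with
  | nil => intro para _; simp [pvBaux, pvEmit_nil]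
  | cons l ls ih =>
    intro para hp
    cases hf : pvIsFence l
    · cases hb : PySem.Str.strip l == ""
      · rw [show pvBaux para (l :: ls) = pvBaux (para ++ [l]) ls by simp [pvBaux, hf, hb],
          ih (para ++ [l]) (by simp)]
        simp [hf, hb]
      · simp [pvBaux, hf, hb, pvEmit_nil]
    · simp [pvBaux, hf, pvEmit_nil]

theorem pvParaSplit (ls : List String) :
    pvParagraphBlocks (pvTakeUntilFence ls).1 ++ pvSplitBlocksB (pvTakeUntilFence ls).2 =
      pvSplitBlocksB ls := by
  cases ls with
  | nil => simp [pvTakeUntilFence, pvParagraphBlocks, pvSplitBlocksB]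
  | cons l ls =>
    cases hf : pvIsFence l
    · simp [pvSplitBlocksB, pvTakeUntilFence, hf]
    · simp [pvSplitBlocksB, pvTakeUntilFence, hf, pvParagraphBlocks]

theorem pvTakeWhile_and (p q : String → Bool) (ls : List String) :
    (ls.takeWhile p).takeWhile q = ls.takeWhile (fun x => p x && q x) := by
  induction ls with
  | nil => simp
  | cons l ls ih =>
    cases hp : p l <;> cases hq : q l <;> simp [hp, hq, ih]

theorem pvDropWhile_head (p : String → Bool) (ls : List String) (x : String)
    (h : (ls.dropWhile p).head? = some x) : p x = false := by
  induction ls with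
  | nil => simp at h
  | cons l ls ih =>
    rw [List.dropWhile_cons] at h
    split at h
    · exact ih h
    · simp_all

theorem pvStopSplit (d : List String)
    (hd : ∀ x, d.head? = some x → (!pvIsFence x && !(PySem.Str.strip x == "")) = false) :
    pvSplitBlocksB d =
      pvParagraphBlocks ((d.takeWhile (fun l => !pvIsFence l)).dropWhile
          (fun x => !(PySem.Str.strip x == ""))) ++
        pvSplitBlocksB (d.dropWhile (fun l => !pvIsFence l)) := by
  cases d with
  | nil => simp [pvSplitBlocksB, pvParagraphBlocks]
  | cons x xs =>
    cases hf : pvIsFence x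
    · have hb : (PySem.Str.strip x == "") = true := by
        have := hd x rfl
        simp [hf] at this
        simpa using this
      rw [pvSplitBlocksB]
      simp only [Bool.false_eq_true, dite_false, pvTakeUntilFence_eq,
        List.takeWhile_cons, List.dropWhile_cons, hf]
      simp [pvParagraphBlocks, hb]
    · simp [pvSplitBlocksB, hf, pvParagraphBlocks]

theorem pvMainB : ∀ (n : Nat) (lines : List String), lines.length ≤ n →
    pvBaux [] lines = pvSplitBlocksB lines := by
  intro n
  induction n with
  | zero =>
    intro lines hlen
    have : lines = [] := by cases lines <;> simp_all
    subst this
    simp [pvBaux, pvEmit_nil, pvSplitBlocksB]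
  | succ n ih =>
    intro lines hlen
    cases lines with
    | nil => simp [pvBaux, pvEmit_nil, pvSplitBlocksB]
    | cons l ls =>
      have hls : ls.length ≤ n := by simpa using hlen
      cases hf : pvIsFence l
      · cases hb : PySem.Str.strip l == ""
        · -- a paragraph line: merge it with the following nonblank/nonfence run
          rw [show pvBaux [] (l :: ls) = pvBaux [l] ls by simp [pvBaux, hf, hb],
            pvBaux_push ls [l] (by simp)]
          have hdw : (ls.dropWhile (fun x => !pvIsFence x && !(PySem.Str.strip x == ""))).length ≤ n :=
            le_trans (ls.length_dropWhile_le _) hls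
          rw [ih _ hdw,
            pvStopSplit (ls.dropWhile (fun x => !pvIsFence x && !(PySem.Str.strip x == "")))
              (fun x hx => pvDropWhile_head _ ls x hx)]
          have hgf : ∀ x ∈ ls.takeWhile (fun x => !pvIsFence x && !(PySem.Str.strip x == "")),
              (fun x => !pvIsFence x) x = true := by
            intro x hx
            have := List.mem_takeWhile_imp hx
            simp only [Bool.and_eq_true] at this
            simpa using this.1
          have hgb : ∀ x ∈ ls.takeWhile (fun x => !pvIsFence x && !(PySem.Str.strip x == "")),
              (fun x => !(PySem.Str.strip x == "")) x = true := by
            intro x hx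
            have := List.mem_takeWhile_imp hx
            simp only [Bool.and_eq_true] at this
            simpa using this.2
          have hsplit : ls = ls.takeWhile (fun x => !pvIsFence x && !(PySem.Str.strip x == "")) ++
              ls.dropWhile (fun x => !pvIsFence x && !(PySem.Str.strip x == "")) :=
            (List.takeWhile_append_dropWhile).symm
          have E2 : ls.takeWhile (fun x => !pvIsFence x) =
              ls.takeWhile (fun x => !pvIsFence x && !(PySem.Str.strip x == "")) ++
              (ls.dropWhile (fun x => !pvIsFence x && !(PySem.Str.strip x == ""))).takeWhile
                (fun x => !pvIsFence x) := by
            conv_lhs => rw [hsplit]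
            exact List.takeWhile_append_of_pos hgf
          have E3 : ls.dropWhile (fun x => !pvIsFence x) =
              (ls.dropWhile (fun x => !pvIsFence x && !(PySem.Str.strip x == ""))).dropWhile
                (fun x => !pvIsFence x) := by
            conv_lhs => rw [hsplit]
            exact List.dropWhile_append_of_pos hgf
          have E1 : (ls.takeWhile (fun x => !pvIsFence x)).takeWhile
                (fun x => !(PySem.Str.strip x == "")) =
              ls.takeWhile (fun x => !pvIsFence x && !(PySem.Str.strip x == "")) := by
            rw [pvTakeWhile_and]
          have E4 : (ls.takeWhile (fun x => !pvIsFence x)).dropWhile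
                (fun x => !(PySem.Str.strip x == "")) =
              ((ls.dropWhile (fun x => !pvIsFence x && !(PySem.Str.strip x == ""))).takeWhile
                (fun x => !pvIsFence x)).dropWhile (fun x => !(PySem.Str.strip x == "")) := by
            rw [E2]
            exact List.dropWhile_append_of_pos hgb
          rw [show pvSplitBlocksB (l :: ls) =
              pvParagraphBlocks (l :: ls.takeWhile (fun x => !pvIsFence x)) ++
                pvSplitBlocksB (ls.dropWhile (fun x => !pvIsFence x)) by
              simp [pvSplitBlocksB, hf, pvTakeUntilFence_eq]]
          rw [show pvParagraphBlocks (l :: ls.takeWhile (fun x => !pvIsFence x)) =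
              pvEmit "text" (l :: (ls.takeWhile (fun x => !pvIsFence x)).takeWhile
                  (fun x => !(PySem.Str.strip x == ""))) ++
                pvParagraphBlocks ((ls.takeWhile (fun x => !pvIsFence x)).dropWhile
                  (fun x => !(PySem.Str.strip x == ""))) by
              simp [pvParagraphBlocks, hb]]
          rw [E1, E4, E3]
          simp
        · -- blank line: skipped by both sides
          rw [show pvBaux [] (l :: ls) = pvBaux [] ls by simp [pvBaux, hf, hb, pvEmit_nil],
            ih ls hls, ← pvParaSplit ls]
          simp [pvSplitBlocksB, hf, pvTakeUntilFence, pvParagraphBlocks, hb]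
      · -- fence line: one code segment on both sides
        rcases h2 : pvTakeUntilFence ls with ⟨body, rest⟩
        cases rest with
        | nil =>
          rw [show pvSplitBlocksB (l :: ls) =
            pvEmit "code" (l :: (body ++ [].take 1)) ++ pvSplitBlocksB (([] : List String).drop 1) by
              simp [pvSplitBlocksB, hf, h2]]
          simp [pvBaux, hf, h2, pvSplitBlocksB, pvEmit_nil]
        | cons f r =>
          have hr : r.length ≤ n := by
            have := pvTakeUntilFence_snd_length ls
            rw [h2] at this
            simp only [List.length_cons] at this
            omega
          rw [show pvBaux [] (l :: ls) =
              pvEmit "text" [] ++ (pvEmit "code" ((l :: body) ++ [f]) ++ pvBaux [] r) by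
                simp [pvBaux, hf, h2]]
          rw [ih r hr, pvEmit_nil]
          simp [pvSplitBlocksB, hf, h2]

-- ===== VERDICT (by name: the statement is the Claim_ definition above) =====
theorem split_section_blocks_py_spec : Claim_equal_split_section_blocks_py := by
  intro text _
  unfold Spec_split_section_blocks_py split_section_blocks_py split_section_blocks_py_alt
  rw [pvMainA (PySem.Str.splitlines text).length _ le_rfl, List.filter_nil, List.nil_append,
    pvMainB (PySem.Str.splitlines text).length _ le_rfl]
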